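-- pv_equiv track=rewrite | github.com/tomkun/empireofcode | crystalite_farm/pattern_recognition.py | mark_patterns
-- ===== SOURCE A (Python) =====
-- def mark_patterns(pattern, image):
--     pattern_len= len(pattern)
--     pattern_row_len = len(pattern[0])
--     row_len = len(image[0])
--
--     for row in range(len(image)-pattern_len+1):
--         for i in range(row_len-pattern_row_len+1):
--             if image[row][i] == pattern[0][0]:
--                 s = subset(image, (row, i), (row+pattern_len, i+pattern_row_len))
--                 if s == pattern:
--                     mark(image, (row, i), pattern_len, pattern_row_len)
--     return image
--
-- def subset(arr, start, end):
--     """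
--     Takes two endpoints (row,col) and returns a sliced copy of a 2d array.
--     Exclusive!
--     """
--     return [[row_data for row_data in row[start[1]:end[1]]] for row in arr[start[0]:end[0]]]
--
-- def mark(image, begin, pattern_len, pattern_row_len):
--     """
--     Performs an in-place modification of the array.
--     """
--     tab = {1:3, 0:2} ## our replacement table
--     for row_idx in range(begin[0], begin[0]+pattern_len):
--         for col_idx in range(begin[1], begin[1]+pattern_row_len):
--             image[row_idx][col_idx] = tab[image[row_idx][col_idx]]
-- ===== SOURCE B (Python) =====
-- def mark_patterns(pattern, image):
--     # Two-phase: collect all static matches in scan order, then greedily keep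
--     # non-overlapping ones via an occupancy set, and rebuild the grid once.
--     # (A mutates `image` in place; B returns a fresh grid with the same value.)
--     pl = len(pattern)
--     prl = len(pattern[0])
--     rows = len(image)
--     cols = len(image[0])
--     matches = [(r, c)
--                for r in range(rows - pl + 1)
--                for c in range(cols - prl + 1)
--                if all(image[r + k][c:c + prl] == pattern[k] for k in range(pl))]
--     covered = set()
--     for (r, c) in matches:
--         cells = [(r + dr, c + dc) for dr in range(pl) for dc in range(prl)]
--         if all(cell not in covered for cell in cells):
--             covered.update(cells)
--     return [[v + 2 if (r, c) in covered else v for c, v in enumerate(row)]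
--             for r, row in enumerate(image)]
-- ===== Notes on version B (the rewrite author's own statement) =====
-- stated objective: alternative
-- what changed: A interleaves matching with in-place marking of the image during one scan (re-slicing a fresh subgrid per candidate); B is two-phase: it first collects all static matches of the pattern in the original image in scan order, then greedily keeps the non-overlapping ones via an occupancy set, and rebuilds the grid once at the end.
-- outside the precondition, e.g. on mark_patterns([[5, 5]], [[0], [5, 5]]): A returns [[0], [5, 5]], B returns [[0], [5, 5]]; on mark_patterns([[], [0]], [[1]]): A returns [[1]], B returns [[1]]
import Mathlib
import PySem

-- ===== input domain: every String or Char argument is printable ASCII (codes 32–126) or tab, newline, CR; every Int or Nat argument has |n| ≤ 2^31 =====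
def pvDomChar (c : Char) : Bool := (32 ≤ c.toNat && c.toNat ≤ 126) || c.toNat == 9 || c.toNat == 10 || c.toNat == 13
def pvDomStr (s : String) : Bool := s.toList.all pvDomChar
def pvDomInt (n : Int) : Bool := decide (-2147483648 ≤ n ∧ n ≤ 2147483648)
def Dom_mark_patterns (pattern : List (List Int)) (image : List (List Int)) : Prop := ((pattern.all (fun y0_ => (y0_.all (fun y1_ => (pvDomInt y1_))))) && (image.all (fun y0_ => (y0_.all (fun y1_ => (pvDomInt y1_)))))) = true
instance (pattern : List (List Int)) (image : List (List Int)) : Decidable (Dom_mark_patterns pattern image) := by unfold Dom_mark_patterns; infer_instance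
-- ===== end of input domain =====

-- B is a two-phase re-implementation (find all static matches, then greedy overlap suppression
-- via an occupancy set, then one rebuild); A marks the image in place while scanning — the
-- equivalence proved here is about the RETURN value (B does not mutate its argument).

-- ===== PORT A =====

-- tab = {1:3, 0:2}; Python raises KeyError for any other value — such inputs are outside Pre_
def pvTab (v : Int) : Int := if v == 1 then 3 else if v == 0 then 2 else v

def pvSubset (arr : List (List Int)) (r0 c0 r1 c1 : Int) : List (List Int) :=
  (PySem.List.slice arr (some r0) (some r1)).map
    (fun row => PySem.List.slice row (some c0) (some c1))

def pvMark (image : List (List Int)) (r0 c0 pl prl : Int) : List (List Int) :=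
  (PySem.List.pyRange r0 (r0 + pl) 1).foldl (fun img ri =>
    (PySem.List.pyRange c0 (c0 + prl) 1).foldl (fun img2 ci =>
      PySem.List.pySetD img2 ri
        (PySem.List.pySetD (PySem.List.pyGetD img2 ri []) ci
          (pvTab (PySem.List.pyGetD (PySem.List.pyGetD img2 ri []) ci 0)))) img) image

def mark_patterns (pattern : List (List Int)) (image : List (List Int)) : List (List Int) :=
  let pattern_len := PySem.List.len pattern
  let pattern_row_len := PySem.List.len (PySem.List.pyGetD pattern 0 [])
  let row_len := PySem.List.len (PySem.List.pyGetD image 0 [])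
  (PySem.List.pyRange 0 (PySem.List.len image - pattern_len + 1) 1).foldl (fun img row =>
    (PySem.List.pyRange 0 (row_len - pattern_row_len + 1) 1).foldl (fun img2 i =>
      if (PySem.List.pyGetD (PySem.List.pyGetD img2 row []) i 0
            == PySem.List.pyGetD (PySem.List.pyGetD pattern 0 []) 0 0)
         && (pvSubset img2 row i (row + pattern_len) (i + pattern_row_len) == pattern)
      then pvMark img2 row i pattern_len pattern_row_len
      else img2) img) image

-- ===== PORT B =====

def pvRowsMatch (pattern image : List (List Int)) (pl prl : Int) (r c : Int) : Bool :=
  (PySem.List.pyRange 0 pl 1).all (fun k =>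
    PySem.List.slice (PySem.List.pyGetD image (r + k) []) (some c) (some (c + prl))
      == PySem.List.pyGetD pattern k [])

def pvCells (r c pl prl : Int) : List (Int × Int) :=
  (PySem.List.pyRange 0 pl 1).flatMap (fun dr =>
    (PySem.List.pyRange 0 prl 1).map (fun dc => (r + dr, c + dc)))

def mark_patterns_alt (pattern : List (List Int)) (image : List (List Int)) : List (List Int) :=
  let pl := PySem.List.len pattern
  let prl := PySem.List.len (PySem.List.pyGetD pattern 0 [])
  let rows := PySem.List.len image
  let cols := PySem.List.len (PySem.List.pyGetD image 0 [])
  let matchList := (PySem.List.pyRange 0 (rows - pl + 1) 1).flatMap (fun r =>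
    (PySem.List.pyRange 0 (cols - prl + 1) 1).filterMap (fun c =>
      if pvRowsMatch pattern image pl prl r c then some (r, c) else none))
  let covered : PySem.Set (Int × Int) := matchList.foldl (fun cov rc =>
    let cells := pvCells rc.1 rc.2 pl prl
    if cells.all (fun cell => !(PySem.Set.contains cov cell))
    then PySem.Set.update cov cells else cov) PySem.Set.empty
  (PySem.List.enumerate image 0).map (fun p =>
    (PySem.List.enumerate p.2 0).map (fun q =>
      if PySem.Set.contains covered (p.1, q.1) then q.2 + 2 else q.2))

-- ===== PRECONDITION & SPEC =====

-- the pl×prl sub-grid of image anchored at (r,c), with Python's truncating slice semantics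
-- (used only by Pre_; the ports have their own transliterated subgrid functions)
def pvSubN (image : List (List Int)) (r c pl prl : Nat) : List (List Int) :=
  ((image.drop r).take pl).map (fun row => (row.drop c).take prl)

-- "pattern occurs somewhere in image" (anchors bounded by the image extent)
def pvHasMatch (pattern image : List (List Int)) : Prop :=
  ∃ r < image.length, ∃ c < (image.getD 0 []).length,
    pvSubN image r c pattern.length (pattern.getD 0 []).length = pattern

-- Pre_ excludes exactly the inputs where Python A raises, plus two corners it narrows over
-- (one qualitative sentence each, concrete excluded examples are in claim.json "cites"):
-- * empty pattern / empty image / empty first pattern row (IndexError whenever the scan runs;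
--   for a too-tall pattern the scan is empty and A returns — those inputs are excluded too);
-- * a visited image row shorter than the scanned column range (IndexError on image[row][i] —
--   this clause excludes exactly the raising inputs);
-- * unless the pattern never occurs in the image, the pattern must be rectangular with values
--   in {0,1}: a matched-and-marked cell outside {0,1} is a KeyError in mark (a ragged pattern
--   can mark unmatched cells; an occurrence that A's scan cannot reach still returns — excluded).
def Pre_mark_patterns (pattern : List (List Int)) (image : List (List Int)) : Prop :=
  pattern ≠ [] ∧ image ≠ [] ∧ pattern.getD 0 [] ≠ [] ∧
  (∀ j, j < image.length → (j : Int) ≤ (image.length : Int) - (pattern.length : Int) →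
    ((image.getD 0 []).length : Int) - ((pattern.getD 0 []).length : Int) + 1
      ≤ ((image.getD j []).length : Int)) ∧
  (((∀ row ∈ pattern, row.length = (pattern.getD 0 []).length) ∧
    (∀ row ∈ pattern, ∀ v ∈ row, v = 0 ∨ v = 1)) ∨ ¬ pvHasMatch pattern image)

instance (pattern : List (List Int)) (image : List (List Int)) : Decidable (Pre_mark_patterns pattern image) := by
  unfold Pre_mark_patterns pvHasMatch; infer_instance

def pvWitness_mark_patterns : List (List Int) × List (List Int) :=
  ([[1, 0]], [[0, 1, 0], [1, 0, 1]])

def Spec_mark_patterns (pattern : List (List Int)) (image : List (List Int)) (out : List (List Int)) : Prop := out = mark_patterns_alt pattern image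
instance (pattern : List (List Int)) (image : List (List Int)) (out : List (List Int)) : Decidable (Spec_mark_patterns pattern image out) := by unfold Spec_mark_patterns; infer_instance

-- ===== CLAIM (what is proved, stated in full; the proofs are below) =====
def Claim_equal_mark_patterns : Prop := ∀ (pattern : List (List Int)) (image : List (List Int)), Dom_mark_patterns pattern image → Pre_mark_patterns pattern image → Spec_mark_patterns pattern image (mark_patterns pattern image)

-- ===== LEMMAS AND PROOFS =====

-- cell accessor (0 outside the grid)
def pvCellv (g : List (List Int)) (i j : Nat) : Int := (g.getD i []).getD j 0

-- painting: add 2 at every covered cell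
def pvPaintRow (cov : List (Nat × Nat)) (i : Nat) (j : Nat) : List Int → List Int
  | [] => []
  | v :: vs => (if (i, j) ∈ cov then v + 2 else v) :: pvPaintRow cov i (j + 1) vs

def pvPaintFrom (cov : List (Nat × Nat)) (i : Nat) : List (List Int) → List (List Int)
  | [] => []
  | row :: rest => pvPaintRow cov i 0 row :: pvPaintFrom cov (i + 1) rest

def pvPaint (cov : List (Nat × Nat)) (g : List (List Int)) : List (List Int) :=
  pvPaintFrom cov 0 g

-- scan-order anchor positions and region cells
def pvPos (n m : Nat) : List (Nat × Nat) :=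
  (List.range n).flatMap (fun r => (List.range m).map (fun c => (r, c)))

def pvCellsN (pl prl r c : Nat) : List (Nat × Nat) :=
  (pvPos pl prl).map (fun q => (r + q.1, c + q.2))

def pvNR (pattern image : List (List Int)) : Nat :=
  ((image.length : Int) - (pattern.length : Int) + 1).toNat

def pvNC (pattern image : List (List Int)) : Nat :=
  (((image.getD 0 []).length : Int) - ((pattern.getD 0 []).length : Int) + 1).toNat

-- the greedy overlap-suppression step, and the final covered-cell list
def pvGStep (pattern image : List (List Int)) (cov : List (Nat × Nat)) (p : Nat × Nat) : List (Nat × Nat) :=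
  if pvSubN image p.1 p.2 pattern.length (pattern.getD 0 []).length = pattern
       ∧ ∀ q ∈ pvCellsN pattern.length (pattern.getD 0 []).length p.1 p.2, q ∉ cov
  then cov ++ pvCellsN pattern.length (pattern.getD 0 []).length p.1 p.2 else cov

def pvGCov (pattern image : List (List Int)) : List (Nat × Nat) :=
  (pvPos (pvNR pattern image) (pvNC pattern image)).foldl (pvGStep pattern image) []

-- covered cells are in-bounds original {0,1} cells
def pvGood (image : List (List Int)) (cov : List (Nat × Nat)) : Prop :=
  ∀ q ∈ cov, q.1 < image.length ∧ q.2 < (image.getD q.1 []).length ∧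
    (pvCellv image q.1 q.2 = 0 ∨ pvCellv image q.1 q.2 = 1)

-- A's loop body over Nat anchor pairs
def pvStepA (pattern : List (List Int)) (g : List (List Int)) (p : Nat × Nat) : List (List Int) :=
  if (PySem.List.pyGetD (PySem.List.pyGetD g (p.1 : Int) []) (p.2 : Int) 0
        == PySem.List.pyGetD (PySem.List.pyGetD pattern 0 []) 0 0)
     && (pvSubset g (p.1 : Int) (p.2 : Int) ((p.1 : Int) + (pattern.length : Int))
           ((p.2 : Int) + ((pattern.getD 0 []).length : Int)) == pattern)
  then pvMark g (p.1 : Int) (p.2 : Int) (pattern.length : Int) ((pattern.getD 0 []).length : Int)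
  else g

-- B's loop body over the same anchor pairs
def pvStepB (pattern image : List (List Int)) (cov : PySem.Set (Int × Int)) (p : Nat × Nat) : PySem.Set (Int × Int) :=
  if pvRowsMatch pattern image (pattern.length : Int) ((pattern.getD 0 []).length : Int) (p.1 : Int) (p.2 : Int)
  then (if (pvCells (p.1 : Int) (p.2 : Int) (pattern.length : Int) ((pattern.getD 0 []).length : Int)).all
              (fun cell => !(PySem.Set.contains cov cell))
        then PySem.Set.update cov (pvCells (p.1 : Int) (p.2 : Int) (pattern.length : Int) ((pattern.getD 0 []).length : Int))
        else cov)
  else cov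

def pvCast (q : Nat × Nat) : Int × Int := ((q.1 : Int), (q.2 : Int))

-- ---- generic list lemmas ----

theorem pvFoldlFlatMap {α β σ : Type} (l : List α) (f : α → List β) (g : σ → β → σ) (init : σ) :
    (l.flatMap f).foldl g init = l.foldl (fun s a => (f a).foldl g s) init := by
  induction l generalizing init with
  | nil => rfl
  | cons a t ih => simp [List.flatMap_cons, List.foldl_append, ih]

theorem pvFoldlFilterMap {α β σ : Type} (l : List α) (f : α → Option β) (g : σ → β → σ) (init : σ) :
    (l.filterMap f).foldl g init = l.foldl (fun s a => (f a).elim s (g s)) init := by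
  induction l generalizing init with
  | nil => rfl
  | cons a t ih => cases h : f a <;> simp [h, ih]

theorem pvRangeShift (r pl : Nat) :
    PySem.List.pyRange (r : Int) ((r : Int) + (pl : Int)) 1
      = (List.range pl).map (fun k => ((r + k : Nat) : Int)) := by
  rw [PySem.List.pyRange_one]
  have h : ((r : Int) + (pl : Int) - (r : Int)) = ((pl : Nat) : Int) := by ring
  rw [h, Int.toNat_natCast]
  apply List.map_congr_left
  intro k _
  omega

theorem pvPos_mem (n m : Nat) (p : Nat × Nat) : p ∈ pvPos n m ↔ p.1 < n ∧ p.2 < m := by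
  obtain ⟨a, b⟩ := p
  simp [pvPos, List.mem_flatMap]

theorem pvPos_nodup (n m : Nat) : (pvPos n m).Nodup := by
  have : pvPos n m = (List.range n).product (List.range m) := rfl
  rw [this]
  exact List.Nodup.product List.nodup_range List.nodup_range

theorem pvPos_foldl {σ : Type} (n m : Nat) (g : σ → Nat × Nat → σ) (init : σ) :
    (pvPos n m).foldl g init
      = (List.range n).foldl (fun s r => (List.range m).foldl (fun s' c => g s' (r, c)) s) init := by
  unfold pvPos
  rw [pvFoldlFlatMap]
  congr 1
  funext s r
  rw [List.foldl_map]

theorem pvCellsN_mem (pl prl r c : Nat) (q : Nat × Nat) :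
    q ∈ pvCellsN pl prl r c ↔ r ≤ q.1 ∧ q.1 < r + pl ∧ c ≤ q.2 ∧ q.2 < c + prl := by
  obtain ⟨a, b⟩ := q
  simp only [pvCellsN, List.mem_map]
  constructor
  · rintro ⟨q, hq, heq⟩
    rw [pvPos_mem] at hq
    obtain ⟨h1, h2⟩ := hq
    cases heq
    omega
  · rintro ⟨h1, h2, h3, h4⟩
    refine ⟨(a - r, b - c), ?_, ?_⟩
    · rw [pvPos_mem]; constructor <;> simp <;> omega
    · simp; omega

theorem pvCellsN_nodup (pl prl r c : Nat) : (pvCellsN pl prl r c).Nodup := by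
  apply List.Nodup.map
  · intro x y hxy
    simp only [Prod.mk.injEq] at hxy
    exact Prod.ext (by omega) (by omega)
  · exact pvPos_nodup pl prl

-- ---- paint lemmas ----

theorem pvPaintRow_getElem? (cov : List (Nat × Nat)) (i j : Nat) (row : List Int) (k : Nat) :
    (pvPaintRow cov i j row)[k]? = row[k]?.map (fun v => if (i, j + k) ∈ cov then v + 2 else v) := by
  induction row generalizing j k with
  | nil => simp [pvPaintRow]
  | cons v vs ih =>
    cases k with
    | zero => simp [pvPaintRow]
    | succ k => simp only [pvPaintRow, List.getElem?_cons_succ, ih]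
                rw [Nat.add_assoc, Nat.add_comm 1 k]

theorem pvPaintRow_length (cov : List (Nat × Nat)) (i j : Nat) (row : List Int) :
    (pvPaintRow cov i j row).length = row.length := by
  induction row generalizing j with
  | nil => rfl
  | cons v vs ih => simp [pvPaintRow, ih]

theorem pvPaintFrom_getElem? (cov : List (Nat × Nat)) (i : Nat) (g : List (List Int)) (r : Nat) :
    (pvPaintFrom cov i g)[r]? = g[r]?.map (fun row => pvPaintRow cov (i + r) 0 row) := by
  induction g generalizing i r with
  | nil => simp [pvPaintFrom]
  | cons row rest ih =>
    cases r with
    | zero => simp [pvPaintFrom]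
    | succ r => simp only [pvPaintFrom, List.getElem?_cons_succ, ih]
                rw [Nat.add_assoc, Nat.add_comm 1 r]

theorem pvPaint_getElem? (cov : List (Nat × Nat)) (g : List (List Int)) (r : Nat) :
    (pvPaint cov g)[r]? = g[r]?.map (fun row => pvPaintRow cov r 0 row) := by
  have := pvPaintFrom_getElem? cov 0 g r
  simpa [pvPaint] using this

theorem pvPaint_length (cov : List (Nat × Nat)) (g : List (List Int)) :
    (pvPaint cov g).length = g.length := by
  have h : ∀ (i : Nat) (g : List (List Int)), (pvPaintFrom cov i g).length = g.length := by
    intro i g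
    induction g generalizing i with
    | nil => rfl
    | cons row rest ih => simp [pvPaintFrom, ih]
  exact h 0 g

theorem pvPaint_rowD (cov : List (Nat × Nat)) (g : List (List Int)) (i : Nat) :
    (pvPaint cov g).getD i [] = pvPaintRow cov i 0 (g.getD i []) := by
  rcases Nat.lt_or_ge i g.length with h | h
  · have h2 : (pvPaint cov g)[i]? = some (pvPaintRow cov i 0 (g.getD i []))  := by
      rw [pvPaint_getElem?, List.getElem?_eq_getElem h]
      simp [List.getD_eq_getElem?_getD, List.getElem?_eq_getElem h]
    simp [List.getD_eq_getElem?_getD, h2]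
  · have h1 : (pvPaint cov g)[i]? = none := by
      rw [List.getElem?_eq_none_iff]
      rw [pvPaint_length]; exact h
    have h2 : g[i]? = none := by rw [List.getElem?_eq_none_iff]; exact h
    simp [List.getD_eq_getElem?_getD, h1, h2, pvPaintRow]

theorem pvPaintRow_getD (cov : List (Nat × Nat)) (i j : Nat) (row : List Int) :
    (pvPaintRow cov i 0 row).getD j 0
      = if (i, j) ∈ cov ∧ j < row.length then row.getD j 0 + 2 else row.getD j 0 := by
  rcases Nat.lt_or_ge j row.length with h | h
  · have h2 : (pvPaintRow cov i 0 row)[j]? = row[j]?.map (fun v => if (i, j) ∈ cov then v + 2 else v) := by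
      simpa using pvPaintRow_getElem? cov i 0 row j
    rw [List.getD_eq_getElem?_getD, h2, List.getElem?_eq_getElem h]
    by_cases hm : (i, j) ∈ cov <;> simp [hm, h, List.getD_eq_getElem?_getD]
  · have h1 : (pvPaintRow cov i 0 row)[j]? = none := by
      rw [List.getElem?_eq_none_iff, pvPaintRow_length]; exact h
    have h2 : row[j]? = none := by rw [List.getElem?_eq_none_iff]; exact h
    simp [List.getD_eq_getElem?_getD, h1, h2]
    omega

theorem pvPaint_cellv (cov : List (Nat × Nat)) (g : List (List Int)) (i j : Nat) :
    pvCellv (pvPaint cov g) i j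
      = if (i, j) ∈ cov ∧ j < (g.getD i []).length then pvCellv g i j + 2 else pvCellv g i j := by
  unfold pvCellv
  rw [pvPaint_rowD, pvPaintRow_getD]

theorem pvPaint_empty (g : List (List Int)) : pvPaint [] g = g := by
  have h : ∀ (i : Nat) (g : List (List Int)), pvPaintFrom [] i g = g := by
    intro i g
    induction g generalizing i with
    | nil => rfl
    | cons row rest ih =>
      have hrow : ∀ (j : Nat), pvPaintRow [] i j row = row := by
        clear ih
        induction row with
        | nil => intro j; rfl
        | cons v vs ihv => intro j; simp [pvPaintRow, ihv]
      simp [pvPaintFrom, ih, hrow]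
  exact h 0 g

-- ---- grid extensionality ----

theorem pvGridExt (g1 g2 : List (List Int))
    (h1 : g1.length = g2.length)
    (h2 : ∀ i, (g1.getD i []).length = (g2.getD i []).length)
    (h3 : ∀ i j, pvCellv g1 i j = pvCellv g2 i j) : g1 = g2 := by
  apply List.ext_getElem h1
  intro i hi1 hi2
  apply List.ext_getElem
  · have := h2 i
    simp only [List.getD_eq_getElem?_getD, List.getElem?_eq_getElem hi1, List.getElem?_eq_getElem hi2] at this
    simpa using this
  · intro j hj1 hj2
    have := h3 i j
    simp only [pvCellv, List.getD_eq_getElem?_getD, List.getElem?_eq_getElem hi1,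
      List.getElem?_eq_getElem hi2, Option.getD_some, List.getElem?_eq_getElem hj1,
      List.getElem?_eq_getElem hj2] at this
    exact this

-- ---- pvSubN facts ----

theorem pvSubN_getElem? (image : List (List Int)) (r c pl prl k : Nat) :
    (pvSubN image r c pl prl)[k]?
      = if k < pl then image[r + k]?.map (fun row => (row.drop c).take prl) else none := by
  unfold pvSubN
  rw [List.getElem?_map, List.getElem?_take, List.getElem?_drop]
  by_cases h : k < pl <;> simp [h]

theorem pvStatic_cell (pattern image : List (List Int)) (r c dr dc : Nat)
    (hrect : ∀ row ∈ pattern, row.length = (pattern.getD 0 []).length)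
    (hst : pvSubN image r c pattern.length (pattern.getD 0 []).length = pattern)
    (hdr : dr < pattern.length) (hdc : dc < (pattern.getD 0 []).length) :
    r + dr < image.length ∧ c + dc < (image.getD (r + dr) []).length ∧
      pvCellv image (r + dr) (c + dc) = pvCellv pattern dr dc := by
  have hrow0 : (pvSubN image r c pattern.length (pattern.getD 0 []).length)[dr]? = pattern[dr]? := by
    rw [hst]
  rw [pvSubN_getElem? image r c _ _ dr, if_pos hdr, List.getElem?_eq_getElem hdr] at hrow0
  obtain ⟨row, hrow, hfr⟩ := Option.map_eq_some_iff.mp hrow0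
  have hplen : (pattern[dr]).length = (pattern.getD 0 []).length :=
    hrect _ (List.getElem_mem hdr)
  have hslen := congrArg List.length hfr
  simp only [List.length_take, List.length_drop, hplen] at hslen
  have hrlen : c + (pattern.getD 0 []).length ≤ row.length := by omega
  have hrR : r + dr < image.length := by
    have := List.getElem?_eq_some_iff.mp hrow
    exact this.1
  have himg : image.getD (r + dr) [] = row := by
    simp [List.getD_eq_getElem?_getD, hrow]
  have hel : ((row.drop c).take (pattern.getD 0 []).length)[dc]? = row[c + dc]? := by
    rw [List.getElem?_take, if_pos hdc, List.getElem?_drop]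
  rw [hfr] at hel
  have hcdlt : c + dc < row.length := by omega
  have hval : row[c + dc]? = (pattern[dr])[dc]? := by rw [← hel]
  refine ⟨hrR, by rw [himg]; exact hcdlt, ?_⟩
  unfold pvCellv
  rw [himg]
  have hpdr : pattern.getD dr [] = pattern[dr] := by
    simp [List.getD_eq_getElem?_getD, List.getElem?_eq_getElem hdr]
  rw [hpdr]
  rw [List.getD_eq_getElem?_getD, List.getD_eq_getElem?_getD, hval]

theorem pvPattern_cell_val (pattern : List (List Int)) (dr dc : Nat)
    (hrect : ∀ row ∈ pattern, row.length = (pattern.getD 0 []).length)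
    (hvals : ∀ row ∈ pattern, ∀ v ∈ row, v = 0 ∨ v = 1)
    (hdr : dr < pattern.length) (hdc : dc < (pattern.getD 0 []).length) :
    pvCellv pattern dr dc = 0 ∨ pvCellv pattern dr dc = 1 := by
  have hpdr : pattern.getD dr [] = pattern[dr] := by
    simp [List.getD_eq_getElem?_getD, List.getElem?_eq_getElem hdr]
  have hplen : (pattern[dr]).length = (pattern.getD 0 []).length :=
    hrect _ (List.getElem_mem hdr)
  have hdc' : dc < (pattern[dr]).length := by omega
  have := hvals (pattern[dr]) (List.getElem_mem hdr) ((pattern[dr])[dc]) (List.getElem_mem hdc')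
  unfold pvCellv
  rw [hpdr]
  simpa [List.getD_eq_getElem?_getD, List.getElem?_eq_getElem hdc'] using this

-- ---- the guard of A over a painted grid ----

theorem pvSubN_paint_eq_of_disjoint (cov : List (Nat × Nat)) (image : List (List Int)) (r c pl prl : Nat)
    (hdis : ∀ q ∈ pvCellsN pl prl r c, q ∉ cov) :
    pvSubN (pvPaint cov image) r c pl prl = pvSubN image r c pl prl := by
  apply List.ext_getElem?
  intro k
  rw [pvSubN_getElem?, pvSubN_getElem?]
  by_cases hk : k < pl
  · rw [if_pos hk, if_pos hk, pvPaint_getElem?]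
    cases himg : image[r + k]? with
    | none => rfl
    | some row =>
      simp only [Option.map_some]
      congr 1
      apply List.ext_getElem?
      intro t
      rw [List.getElem?_take, List.getElem?_take]
      by_cases ht : t < prl
      · rw [if_pos ht, if_pos ht, List.getElem?_drop, List.getElem?_drop,
          pvPaintRow_getElem?]
        have hnot : (r + k, c + t) ∉ cov := by
          apply hdis
          rw [pvCellsN_mem]
          omega
        simp [hnot]
      · rw [if_neg ht, if_neg ht]
  · rw [if_neg hk, if_neg hk]

theorem pvSubN_paint_ne_of_hit (cov : List (Nat × Nat)) (pattern image : List (List Int)) (r c : Nat)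
    (hrect : ∀ row ∈ pattern, row.length = (pattern.getD 0 []).length)
    (hvals : ∀ row ∈ pattern, ∀ v ∈ row, v = 0 ∨ v = 1)
    (hGood : pvGood image cov)
    (q : Nat × Nat) (hq : q ∈ cov)
    (hwin : q ∈ pvCellsN pattern.length (pattern.getD 0 []).length r c) :
    pvSubN (pvPaint cov image) r c pattern.length (pattern.getD 0 []).length ≠ pattern := by
  intro heq
  rw [pvCellsN_mem] at hwin
  obtain ⟨hw1, hw2, hw3, hw4⟩ := hwin
  set pl := pattern.length with hpl
  set prl := (pattern.getD 0 []).length with hprl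
  set dr := q.1 - r with hdr
  set dc := q.2 - c with hdc
  have hdrlt : dr < pl := by omega
  have hdclt : dc < prl := by omega
  -- extract row dr of the painted subgrid
  have hrow0 : (pvSubN (pvPaint cov image) r c pl prl)[dr]? = pattern[dr]? := by rw [heq]
  rw [pvSubN_getElem?, if_pos hdrlt, List.getElem?_eq_getElem hdrlt, pvPaint_getElem?] at hrow0
  cases himg : image[r + dr]? with
  | none => rw [himg] at hrow0; simp at hrow0
  | some row =>
    rw [himg] at hrow0
    simp only [Option.map_some, Option.some.injEq] at hrow0
    have hplen : (pattern[dr]).length = prl := hrect _ (List.getElem_mem hdrlt)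
    have hslen := congrArg List.length hrow0
    simp only [List.length_take, List.length_drop, pvPaintRow_length, hplen] at hslen
    have hrlen : c + prl ≤ row.length := by omega
    -- the painted cell at q sits inside the matched window
    have hel : (((pvPaintRow cov (r + dr) 0 row).drop c).take prl)[dc]?
        = (pvPaintRow cov (r + dr) 0 row)[c + dc]? := by
      rw [List.getElem?_take, if_pos hdclt, List.getElem?_drop]
    rw [hrow0] at hel
    have hq1 : r + dr = q.1 := by omega
    have hq2 : c + dc = q.2 := by omega
    have hGq := hGood q hq
    have himgD : image.getD q.1 [] = row := by
      rw [← hq1]; simp [List.getD_eq_getElem?_getD, himg]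
    have hqvlt : q.2 < row.length := by
      have := hGq.2.1; rw [himgD] at this; exact this
    have hqval : row[q.2] = 0 ∨ row[q.2] = 1 := by
      have := hGq.2.2
      unfold pvCellv at this
      rw [himgD, List.getD_eq_getElem?_getD, List.getElem?_eq_getElem hqvlt] at this
      simpa using this
    have hpaintq : (pvPaintRow cov (r + dr) 0 row)[c + dc]? = some (row[q.2] + 2) := by
      rw [pvPaintRow_getElem?]
      have : (r + dr, 0 + (c + dc)) ∈ cov := by
        simpa [hq1, hq2] using hq
      rw [hq2, List.getElem?_eq_getElem hqvlt]
      simp only [Option.map_some]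
      rw [if_pos (by simpa [hq1, hq2] using hq)]
    rw [hpaintq] at hel
    have hpval := pvPattern_cell_val pattern dr dc hrect hvals hdrlt hdclt
    unfold pvCellv at hpval
    have hpdr : pattern.getD dr [] = pattern[dr] := by
      simp [List.getD_eq_getElem?_getD, List.getElem?_eq_getElem hdrlt]
    rw [hpdr, List.getD_eq_getElem?_getD] at hpval
    have hdcp : dc < (pattern[dr]).length := by omega
    rw [List.getElem?_eq_getElem hdcp] at hpval
    rw [List.getElem?_eq_getElem hdcp] at hel
    simp only [Option.some.injEq] at hel
    simp only [Option.getD_some] at hpval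
    omega

theorem pvGuard_iff (cov : List (Nat × Nat)) (pattern image : List (List Int)) (r c : Nat)
    (hp : pattern ≠ []) (hph : pattern.getD 0 [] ≠ [])
    (hrect : ∀ row ∈ pattern, row.length = (pattern.getD 0 []).length)
    (hvals : ∀ row ∈ pattern, ∀ v ∈ row, v = 0 ∨ v = 1)
    (hGood : pvGood image cov) :
    (((pvCellv (pvPaint cov image) r c == pvCellv pattern 0 0)
        && (pvSubN (pvPaint cov image) r c pattern.length (pattern.getD 0 []).length == pattern)) = true)
      ↔ (pvSubN image r c pattern.length (pattern.getD 0 []).length = pattern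
           ∧ ∀ q ∈ pvCellsN pattern.length (pattern.getD 0 []).length r c, q ∉ cov) := by
  have hpl : 0 < pattern.length := List.length_pos_iff.mpr hp
  have hprl : 0 < (pattern.getD 0 []).length := List.length_pos_iff.mpr hph
  constructor
  · intro h
    rw [Bool.and_eq_true, beq_iff_eq, beq_iff_eq] at h
    have hpeq := h.2
    have hdis : ∀ q ∈ pvCellsN pattern.length (pattern.getD 0 []).length r c, q ∉ cov := by
      intro q hqin hqcov
      exact pvSubN_paint_ne_of_hit cov pattern image r c hrect hvals hGood q hqcov hqin hpeq
    refine ⟨?_, hdis⟩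
    rw [← pvSubN_paint_eq_of_disjoint cov image r c _ _ hdis]
    exact hpeq
  · rintro ⟨hst, hdis⟩
    rw [Bool.and_eq_true, beq_iff_eq, beq_iff_eq]
    have hpeq : pvSubN (pvPaint cov image) r c pattern.length (pattern.getD 0 []).length = pattern := by
      rw [pvSubN_paint_eq_of_disjoint cov image r c _ _ hdis]
      exact hst
    refine ⟨?_, hpeq⟩
    have hrc : (r, c) ∉ cov := by
      apply hdis
      rw [pvCellsN_mem]
      omega
    have hcell := pvStatic_cell pattern image r c 0 0 hrect hst hpl hprl
    rw [pvPaint_cellv]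
    rw [if_neg (by rintro ⟨h1, _⟩; exact hrc h1)]
    simpa using hcell.2.2

-- ---- pvMark over a painted grid ----

def pvSet1 (g : List (List Int)) (q : Nat × Nat) : List (List Int) :=
  g.set q.1 ((g.getD q.1 []).set q.2 (pvTab ((g.getD q.1 []).getD q.2 0)))

theorem pvMark_eq_foldSet (g : List (List Int)) (r c pl prl : Nat) :
    pvMark g (r : Int) (c : Int) (pl : Int) (prl : Int) = (pvCellsN pl prl r c).foldl pvSet1 g := by
  unfold pvMark
  rw [pvRangeShift r pl, pvRangeShift c prl, List.foldl_map]
  rw [pvCellsN, List.foldl_map, pvPos_foldl]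
  congr 1
  funext img k
  rw [List.foldl_map]
  congr 1
  funext img2 t
  simp only [PySem.List.pySetD_natCast, PySem.List.pyGetD_natCast, pvSet1]

theorem pvSet1_length (g : List (List Int)) (q : Nat × Nat) : (pvSet1 g q).length = g.length := by
  simp [pvSet1]

theorem pvSet1_rowLen (g : List (List Int)) (q : Nat × Nat) (i : Nat) :
    ((pvSet1 g q).getD i []).length = (g.getD i []).length := by
  obtain ⟨q1, q2⟩ := q
  unfold pvSet1
  rcases eq_or_ne q1 i with rfl | hne
  · rcases Nat.lt_or_ge q1 g.length with h | h
    · simp [List.getD_eq_getElem?_getD, List.getElem?_set_self h]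
    · rw [List.set_eq_of_length_le (by omega)]
  · simp [List.getD_eq_getElem?_getD, List.getElem?_set_ne hne]

theorem pvSet1_cellv (g : List (List Int)) (q : Nat × Nat) (i j : Nat)
    (hq1 : q.1 < g.length) (hq2 : q.2 < (g.getD q.1 []).length) :
    pvCellv (pvSet1 g q) i j = if (i, j) = q then pvTab (pvCellv g q.1 q.2) else pvCellv g i j := by
  obtain ⟨q1, q2⟩ := q
  simp only at hq1 hq2
  unfold pvCellv pvSet1
  rcases eq_or_ne q1 i with rfl | hne
  · have hrow : g.getD q1 [] = g[q1] := by
      simp [List.getD_eq_getElem?_getD, List.getElem?_eq_getElem hq1]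
    rw [hrow] at hq2 ⊢
    rcases eq_or_ne q2 j with rfl | hne2
    · rw [if_pos rfl]
      simp [List.getD_eq_getElem?_getD, List.getElem?_set_self hq1,
        List.getElem?_set_self hq2, List.getElem?_eq_getElem hq2]
    · rw [if_neg (by simp only [Prod.mk.injEq]; omega)]
      simp [List.getD_eq_getElem?_getD, List.getElem?_set_self hq1,
        List.getElem?_set_ne hne2]
  · rw [if_neg (by simp only [Prod.mk.injEq]; omega)]
    simp [List.getD_eq_getElem?_getD, List.getElem?_set_ne hne]

theorem pvFoldSet_length (qs : List (Nat × Nat)) (g : List (List Int)) :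
    (qs.foldl pvSet1 g).length = g.length := by
  induction qs generalizing g with
  | nil => rfl
  | cons q t ih => rw [List.foldl_cons, ih, pvSet1_length]

theorem pvFoldSet_rowLen (qs : List (Nat × Nat)) (g : List (List Int)) (i : Nat) :
    ((qs.foldl pvSet1 g).getD i []).length = (g.getD i []).length := by
  induction qs generalizing g with
  | nil => rfl
  | cons q t ih => rw [List.foldl_cons, ih, pvSet1_rowLen]

theorem pvFoldSet_cellv (qs : List (Nat × Nat)) (g : List (List Int)) (i j : Nat)
    (hnd : qs.Nodup) (hb : ∀ q ∈ qs, q.1 < g.length ∧ q.2 < (g.getD q.1 []).length) :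
    pvCellv (qs.foldl pvSet1 g) i j
      = if (i, j) ∈ qs then pvTab (pvCellv g i j) else pvCellv g i j := by
  have main : ∀ (qs : List (Nat × Nat)) (g : List (List Int)), qs.Nodup →
      (∀ q ∈ qs, q.1 < g.length ∧ q.2 < (g.getD q.1 []).length) →
      pvCellv (qs.foldl pvSet1 g) i j
        = if (i, j) ∈ qs then pvTab (pvCellv g i j) else pvCellv g i j := by
    intro qs
    induction qs with
    | nil => intro g _ _; simp
    | cons q t ih =>
      intro g hnd hb
      rw [List.foldl_cons]
      have hq := hb q List.mem_cons_self
      have hnd' := List.nodup_cons.mp hnd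
      have hb' : ∀ p ∈ t, p.1 < (pvSet1 g q).length ∧ p.2 < ((pvSet1 g q).getD p.1 []).length := by
        intro p hp
        rw [pvSet1_length, pvSet1_rowLen]
        exact hb p (List.mem_cons_of_mem _ hp)
      rw [ih (pvSet1 g q) hnd'.2 hb']
      rcases eq_or_ne (i, j) q with heq | hne
      · rw [if_neg (by rw [← heq] at hnd'; exact fun h => hnd'.1 (heq ▸ h)),
          if_pos (by rw [heq]; exact List.mem_cons_self)]
        rw [pvSet1_cellv g q i j hq.1 hq.2, if_pos heq, ← heq]
      · rw [pvSet1_cellv g q i j hq.1 hq.2, if_neg hne]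
        by_cases hmem : (i, j) ∈ t
        · rw [if_pos hmem, if_pos (List.mem_cons_of_mem _ hmem)]
        · rw [if_neg hmem, if_neg (by rw [List.mem_cons]; rintro (h | h); exact hne h; exact hmem h)]
  exact main qs g hnd hb

theorem pvMark_paint (cov : List (Nat × Nat)) (pattern image : List (List Int)) (r c : Nat)
    (hrect : ∀ row ∈ pattern, row.length = (pattern.getD 0 []).length)
    (hvals : ∀ row ∈ pattern, ∀ v ∈ row, v = 0 ∨ v = 1)
    (hst : pvSubN image r c pattern.length (pattern.getD 0 []).length = pattern)
    (hdis : ∀ q ∈ pvCellsN pattern.length (pattern.getD 0 []).length r c, q ∉ cov) :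
    pvMark (pvPaint cov image) (r : Int) (c : Int) (pattern.length : Int) ((pattern.getD 0 []).length : Int)
      = pvPaint (cov ++ pvCellsN pattern.length (pattern.getD 0 []).length r c) image := by
  rw [pvMark_eq_foldSet]
  have hbnd : ∀ q ∈ pvCellsN pattern.length (pattern.getD 0 []).length r c,
      q.1 < (pvPaint cov image).length ∧ q.2 < ((pvPaint cov image).getD q.1 []).length := by
    intro q hq
    rw [pvCellsN_mem] at hq
    have hcell := pvStatic_cell pattern image r c (q.1 - r) (q.2 - c) hrect hst (by omega) (by omega)
    have e1 : r + (q.1 - r) = q.1 := by omega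
    have e2 : c + (q.2 - c) = q.2 := by omega
    rw [e1, e2] at hcell
    rw [pvPaint_length, pvPaint_rowD, pvPaintRow_length]
    exact ⟨hcell.1, hcell.2.1⟩
  apply pvGridExt
  · rw [pvFoldSet_length, pvPaint_length, pvPaint_length]
  · intro i
    rw [pvFoldSet_rowLen, pvPaint_rowD, pvPaintRow_length, pvPaint_rowD, pvPaintRow_length]
  · intro i j
    rw [pvFoldSet_cellv _ _ i j (pvCellsN_nodup _ _ _ _) hbnd, pvPaint_cellv, pvPaint_cellv]
    by_cases hcells : (i, j) ∈ pvCellsN pattern.length (pattern.getD 0 []).length r c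
    · have hnotcov : (i, j) ∉ cov := hdis _ hcells
      rw [pvCellsN_mem] at hcells
      have hcell := pvStatic_cell pattern image r c (i - r) (j - c) hrect hst (by omega) (by omega)
      have e1 : r + (i - r) = i := by omega
      have e2 : c + (j - c) = j := by omega
      rw [e1, e2] at hcell
      have hval := pvPattern_cell_val pattern (i - r) (j - c) hrect hvals (by omega) (by omega)
      rw [if_pos (by rw [pvCellsN_mem]; omega)]
      rw [if_neg (by rintro ⟨h1, _⟩; exact hnotcov h1)]
      rw [if_pos ⟨List.mem_append_right _ (by rw [pvCellsN_mem]; omega), hcell.2.1⟩]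
      rw [hcell.2.2]
      unfold pvTab
      rcases hval with h | h <;> rw [h] <;> decide
    · rw [if_neg hcells]
      by_cases hcov : (i, j) ∈ cov ∧ j < (image.getD i []).length
      · rw [if_pos hcov, if_pos ⟨List.mem_append_left _ hcov.1, hcov.2⟩]
      · rw [if_neg hcov, if_neg (by
          rintro ⟨hmem, hlen⟩
          rcases List.mem_append.mp hmem with h | h
          · exact hcov ⟨h, hlen⟩
          · exact hcells h)]

-- ---- A: step and loop ----

theorem pvSubset_natCast (g : List (List Int)) (r c pl prl : Nat) :
    pvSubset g (r : Int) (c : Int) ((r : Int) + (pl : Int)) ((c : Int) + (prl : Int))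
      = pvSubN g r c pl prl := by
  unfold pvSubset pvSubN
  have e1 : (r : Int) + (pl : Int) = ((r + pl : Nat) : Int) := by push_cast; ring
  have e2 : (c : Int) + (prl : Int) = ((c + prl : Nat) : Int) := by push_cast; ring
  rw [e1, e2, PySem.List.slice_natCast]
  rw [Nat.add_sub_cancel_left]
  apply List.map_congr_left
  intro row _
  rw [PySem.List.slice_natCast, Nat.add_sub_cancel_left]

theorem pvGStep_good (pattern image : List (List Int)) (cov : List (Nat × Nat)) (p : Nat × Nat)
    (hrect : ∀ row ∈ pattern, row.length = (pattern.getD 0 []).length)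
    (hvals : ∀ row ∈ pattern, ∀ v ∈ row, v = 0 ∨ v = 1)
    (hGood : pvGood image cov) : pvGood image (pvGStep pattern image cov p) := by
  unfold pvGStep
  split_ifs with h
  · intro q hq
    rcases List.mem_append.mp hq with hmem | hmem
    · exact hGood q hmem
    · rw [pvCellsN_mem] at hmem
      have hcell := pvStatic_cell pattern image p.1 p.2 (q.1 - p.1) (q.2 - p.2) hrect h.1 (by omega) (by omega)
      have e1 : p.1 + (q.1 - p.1) = q.1 := by omega
      have e2 : p.2 + (q.2 - p.2) = q.2 := by omega
      rw [e1, e2] at hcell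
      have hval := pvPattern_cell_val pattern (q.1 - p.1) (q.2 - p.2) hrect hvals (by omega) (by omega)
      rw [hcell.2.2]
      exact ⟨hcell.1, hcell.2.1, hval⟩
  · exact hGood

theorem pvStepA_eq (pattern image : List (List Int)) (cov : List (Nat × Nat)) (p : Nat × Nat)
    (hp : pattern ≠ []) (hph : pattern.getD 0 [] ≠ [])
    (hrect : ∀ row ∈ pattern, row.length = (pattern.getD 0 []).length)
    (hvals : ∀ row ∈ pattern, ∀ v ∈ row, v = 0 ∨ v = 1)
    (hGood : pvGood image cov) :
    pvStepA pattern (pvPaint cov image) p = pvPaint (pvGStep pattern image cov p) image := by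
  unfold pvStepA pvGStep
  have hconv : ((PySem.List.pyGetD (PySem.List.pyGetD (pvPaint cov image) (p.1 : Int) []) (p.2 : Int) 0
        == PySem.List.pyGetD (PySem.List.pyGetD pattern 0 []) 0 0)
      && (pvSubset (pvPaint cov image) (p.1 : Int) (p.2 : Int) ((p.1 : Int) + (pattern.length : Int))
            ((p.2 : Int) + ((pattern.getD 0 []).length : Int)) == pattern))
      = ((pvCellv (pvPaint cov image) p.1 p.2 == pvCellv pattern 0 0)
          && (pvSubN (pvPaint cov image) p.1 p.2 pattern.length (pattern.getD 0 []).length == pattern)) := by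
    rw [pvSubset_natCast]
    simp only [PySem.List.pyGetD_natCast, PySem.List.pyGetD_zero]
    rfl
  rw [hconv]
  have hguard := pvGuard_iff cov pattern image p.1 p.2 hp hph hrect hvals hGood
  by_cases hcond : ((pvCellv (pvPaint cov image) p.1 p.2 == pvCellv pattern 0 0)
      && (pvSubN (pvPaint cov image) p.1 p.2 pattern.length (pattern.getD 0 []).length == pattern)) = true
  · rw [if_pos hcond, if_pos (hguard.mp hcond)]
    obtain ⟨hst, hdis⟩ := hguard.mp hcond
    exact pvMark_paint cov pattern image p.1 p.2 hrect hvals hst hdis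
  · rw [if_neg hcond, if_neg (fun h => hcond (hguard.mpr h))]

theorem pvALoop (pattern image : List (List Int)) (ps : List (Nat × Nat)) (cov : List (Nat × Nat))
    (hp : pattern ≠ []) (hph : pattern.getD 0 [] ≠ [])
    (hrect : ∀ row ∈ pattern, row.length = (pattern.getD 0 []).length)
    (hvals : ∀ row ∈ pattern, ∀ v ∈ row, v = 0 ∨ v = 1)
    (hGood : pvGood image cov) :
    ps.foldl (pvStepA pattern) (pvPaint cov image)
      = pvPaint (ps.foldl (pvGStep pattern image) cov) image := by
  induction ps generalizing cov with
  | nil => rfl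
  | cons p t ih =>
    rw [List.foldl_cons, List.foldl_cons,
      pvStepA_eq pattern image cov p hp hph hrect hvals hGood]
    exact ih (pvGStep pattern image cov p) (pvGStep_good pattern image cov p hrect hvals hGood)

theorem pvA_norm (pattern image : List (List Int)) :
    mark_patterns pattern image
      = (pvPos (pvNR pattern image) (pvNC pattern image)).foldl (pvStepA pattern) image := by
  unfold mark_patterns pvNR pvNC
  simp only [PySem.List.len_eq, PySem.List.pyRange_zero, List.foldl_map]
  rw [pvPos_foldl]
  simp only [pvStepA, PySem.List.pyGetD_zero]

-- ---- B: normalization and loop ----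

theorem pvRowsMatch_iff (pattern image : List (List Int)) (r c : Nat)
    (h : r + pattern.length ≤ image.length) :
    pvRowsMatch pattern image (pattern.length : Int) ((pattern.getD 0 []).length : Int) (r : Int) (c : Int) = true
      ↔ pvSubN image r c pattern.length (pattern.getD 0 []).length = pattern := by
  have hpt : ∀ k : Nat, k < pattern.length →
      ((PySem.List.slice (PySem.List.pyGetD image ((r : Int) + (k : Int)) [])
          (some (c : Int)) (some ((c : Int) + ((pattern.getD 0 []).length : Int)))
        == PySem.List.pyGetD pattern (k : Int) []) = true
      ↔ ((image.getD (r + k) []).drop c).take (pattern.getD 0 []).length = pattern.getD k []) := by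
    intro k hk
    have e1 : (r : Int) + (k : Int) = ((r + k : Nat) : Int) := by push_cast; ring
    have e2 : (c : Int) + ((pattern.getD 0 []).length : Int)
        = ((c + (pattern.getD 0 []).length : Nat) : Int) := by push_cast; ring
    rw [e1, e2, PySem.List.pyGetD_natCast, PySem.List.pyGetD_natCast,
      PySem.List.slice_natCast, Nat.add_sub_cancel_left, beq_iff_eq]
  unfold pvRowsMatch
  rw [PySem.List.pyRange_zero_nat, List.all_map, List.all_eq_true]
  constructor
  · intro hall
    apply List.ext_getElem?
    intro k
    rw [pvSubN_getElem?]
    by_cases hk : k < pattern.length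
    · rw [if_pos hk]
      have hrk : r + k < image.length := by omega
      have hg1 : image.getD (r + k) [] = image[r + k] := by
        simp [List.getD_eq_getElem?_getD, List.getElem?_eq_getElem hrk]
      have hg2 : pattern.getD k [] = pattern[k] := by
        simp [List.getD_eq_getElem?_getD, List.getElem?_eq_getElem hk]
      have hraw := hall k (List.mem_range.mpr hk)
      simp only [Function.comp_apply] at hraw
      have hthis := (hpt k hk).mp hraw
      rw [hg1, hg2] at hthis
      rw [List.getElem?_eq_getElem hrk, List.getElem?_eq_getElem hk, Option.map_some, hthis]
    · rw [if_neg hk]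
      symm
      rw [List.getElem?_eq_none_iff]
      omega
  · intro he k hkr
    have hk := List.mem_range.mp hkr
    simp only [Function.comp_apply]
    apply (hpt k hk).mpr
    have hrk : r + k < image.length := by omega
    have hg1 : image.getD (r + k) [] = image[r + k] := by
      simp [List.getD_eq_getElem?_getD, List.getElem?_eq_getElem hrk]
    have hg2 : pattern.getD k [] = pattern[k] := by
      simp [List.getD_eq_getElem?_getD, List.getElem?_eq_getElem hk]
    have hrow : (pvSubN image r c pattern.length (pattern.getD 0 []).length)[k]? = pattern[k]? := by
      rw [he]
    rw [pvSubN_getElem?, if_pos hk, List.getElem?_eq_getElem hrk, Option.map_some,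
      List.getElem?_eq_getElem hk] at hrow
    rw [hg1, hg2]
    exact Option.some.inj hrow

theorem pvCells_eq (r c pl prl : Nat) :
    pvCells (r : Int) (c : Int) (pl : Int) (prl : Int) = (pvCellsN pl prl r c).map pvCast := by
  unfold pvCells pvCellsN pvPos
  rw [PySem.List.pyRange_zero_nat, PySem.List.pyRange_zero_nat, List.flatMap_map]
  simp only [List.map_map, List.map_flatMap]
  congr 1

theorem pvCast_inj : Function.Injective pvCast := by
  intro a b h
  simp only [pvCast, Prod.mk.injEq, Nat.cast_inj] at h
  exact Prod.ext h.1 h.2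

theorem pvBLoop (pattern image : List (List Int)) (ps : List (Nat × Nat)) (cov : List (Nat × Nat))
    (hv : ∀ p ∈ ps, p.1 + pattern.length ≤ image.length) :
    ps.foldl (pvStepB pattern image) (cov.map pvCast)
      = (ps.foldl (pvGStep pattern image) cov).map pvCast := by
  induction ps generalizing cov with
  | nil => rfl
  | cons p t ih =>
    rw [List.foldl_cons, List.foldl_cons]
    have hp := hv p List.mem_cons_self
    have hstep : pvStepB pattern image (cov.map pvCast) p = (pvGStep pattern image cov p).map pvCast := by
      unfold pvStepB pvGStep
      rw [pvCells_eq]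
      have hmemiff : ∀ q : Nat × Nat, pvCast q ∈ cov.map pvCast ↔ q ∈ cov := by
        intro q
        exact List.mem_map_of_injective pvCast_inj
      have hdisiff :
          ((pvCellsN pattern.length (pattern.getD 0 []).length p.1 p.2).map pvCast).all
              (fun cell => !(PySem.Set.contains (cov.map pvCast) cell)) = true
            ↔ ∀ q ∈ pvCellsN pattern.length (pattern.getD 0 []).length p.1 p.2, q ∉ cov := by
        rw [List.all_map, List.all_eq_true]
        constructor
        · intro hall q hq hqcov
          have h1 := hall q hq
          simp only [Function.comp_apply] at h1
          have h2 : PySem.Set.contains (cov.map pvCast) (pvCast q) = true :=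
            (PySem.Set.contains_iff _ _).mpr ((hmemiff q).mpr hqcov)
          rw [h2] at h1
          simp at h1
        · intro hd q hq
          simp only [Function.comp_apply]
          cases hc : PySem.Set.contains (cov.map pvCast) (pvCast q) with
          | false => rfl
          | true => exact absurd ((hmemiff q).mp ((PySem.Set.contains_iff _ _).mp hc)) (hd q hq)
      by_cases hraw : pvRowsMatch pattern image (pattern.length : Int)
          ((pattern.getD 0 []).length : Int) ((p.1 : Nat) : Int) ((p.2 : Nat) : Int) = true
      · rw [if_pos hraw]
        have hst := (pvRowsMatch_iff pattern image p.1 p.2 hp).mp hraw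
        by_cases hdis : ∀ q ∈ pvCellsN pattern.length (pattern.getD 0 []).length p.1 p.2, q ∉ cov
        · rw [if_pos (hdisiff.mpr hdis), if_pos ⟨hst, hdis⟩]
          rw [PySem.Set.update_eq_append_of_disjoint _ _
            (List.Nodup.map pvCast_inj (pvCellsN_nodup _ _ _ _))
            (by intro x hx
                rw [List.mem_map] at hx
                obtain ⟨q, hq, rfl⟩ := hx
                intro hmem
                exact hdis q hq ((hmemiff q).mp hmem))]
          rw [List.map_append]
        · rw [if_neg (fun hall => hdis (hdisiff.mp hall)), if_neg (fun hand => hdis hand.2)]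
      · rw [if_neg hraw, if_neg (fun hand =>
          hraw ((pvRowsMatch_iff pattern image p.1 p.2 hp).mpr hand.1))]
    rw [hstep]
    exact ih (pvGStep pattern image cov p) (fun q hq => hv q (List.mem_cons_of_mem _ hq))

theorem pvBOut (covN : List (Nat × Nat)) (g : List (List Int)) :
    (PySem.List.enumerate g 0).map (fun p =>
      (PySem.List.enumerate p.2 0).map (fun q =>
        if PySem.Set.contains (covN.map pvCast) (p.1, q.1) then q.2 + 2 else q.2))
      = pvPaint covN g := by
  have hcont : ∀ (i j : Nat),
      PySem.Set.contains (covN.map pvCast) ((i : Int), (j : Int)) = decide ((i, j) ∈ covN) := by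
    intro i j
    by_cases hm : (i, j) ∈ covN
    · rw [decide_eq_true hm]
      exact (PySem.Set.contains_iff _ _).mpr (List.mem_map_of_injective pvCast_inj |>.mpr hm)
    · rw [decide_eq_false hm]
      cases hc : PySem.Set.contains (covN.map pvCast) ((i : Int), (j : Int)) with
      | false => rfl
      | true => exact absurd ((List.mem_map_of_injective pvCast_inj).mp
          ((PySem.Set.contains_iff _ _).mp hc)) hm
  have hrow : ∀ (i : Nat) (row : List Int) (j : Nat),
      (PySem.List.enumerate row (j : Int)).map (fun q =>
        if PySem.Set.contains (covN.map pvCast) ((i : Int), q.1) then q.2 + 2 else q.2)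
        = pvPaintRow covN i j row := by
    intro i row
    induction row with
    | nil => intro j; rfl
    | cons v vs ihv =>
      intro j
      rw [PySem.List.enumerate_cons, List.map_cons]
      have e1 : (j : Int) + 1 = ((j + 1 : Nat) : Int) := by push_cast; ring
      rw [e1, ihv (j + 1)]
      rw [show pvPaintRow covN i j (v :: vs)
          = (if (i, j) ∈ covN then v + 2 else v) :: pvPaintRow covN i (j + 1) vs from rfl]
      congr 1
      rw [hcont i j]
      by_cases hm : (i, j) ∈ covN
      · rw [if_pos (by rw [decide_eq_true hm]), if_pos hm]
      · rw [if_neg (by rw [decide_eq_false hm]; exact Bool.false_ne_true), if_neg hm]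
  have hmain : ∀ (i : Nat) (g : List (List Int)),
      (PySem.List.enumerate g (i : Int)).map (fun p =>
        (PySem.List.enumerate p.2 0).map (fun q =>
          if PySem.Set.contains (covN.map pvCast) (p.1, q.1) then q.2 + 2 else q.2))
        = pvPaintFrom covN i g := by
    intro i g
    induction g generalizing i with
    | nil => rfl
    | cons row rest ihg =>
      rw [PySem.List.enumerate_cons, List.map_cons]
      have e1 : (i : Int) + 1 = ((i + 1 : Nat) : Int) := by push_cast; ring
      rw [e1, ihg (i + 1)]
      rw [show pvPaintFrom covN i (row :: rest)
          = pvPaintRow covN i 0 row :: pvPaintFrom covN (i + 1) rest from rfl]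
      congr 1
      have := hrow i row 0
      simpa using this
  have := hmain 0 g
  simpa using this

theorem pvPos_bounds (pattern image : List (List Int)) (p : Nat × Nat)
    (hmem : p ∈ pvPos (pvNR pattern image) (pvNC pattern image)) :
    p.1 + pattern.length ≤ image.length
      ∧ p.2 + (pattern.getD 0 []).length ≤ (image.getD 0 []).length := by
  rw [pvPos_mem] at hmem
  unfold pvNR pvNC at hmem
  omega

theorem pvB_norm (pattern image : List (List Int)) :
    mark_patterns_alt pattern image = pvPaint (pvGCov pattern image) image := by
  unfold mark_patterns_alt pvGCov
  simp only [PySem.List.len_eq, PySem.List.pyRange_zero, PySem.List.pyGetD_zero]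
  rw [List.flatMap_map, pvFoldlFlatMap]
  simp only [List.filterMap_map, pvFoldlFilterMap]
  have hbody : ∀ (s : PySem.Set (Int × Int)) (a a1 : Nat),
      (((fun x : Int => if pvRowsMatch pattern image (pattern.length : Int)
              ((pattern.getD 0 []).length : Int) (a : Int) x
            then some ((a : Int), x) else none) ∘ (fun k : Nat => (k : Int))) a1).elim s
        (fun rc => if ((pvCells rc.1 rc.2 (pattern.length : Int) ((pattern.getD 0 []).length : Int)).all
              (fun cell => !(PySem.Set.contains s cell))) = true
          then PySem.Set.update s (pvCells rc.1 rc.2 (pattern.length : Int) ((pattern.getD 0 []).length : Int))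
          else s)
      = pvStepB pattern image s (a, a1) := by
    intro s a a1
    simp only [Function.comp_apply]
    by_cases hm : pvRowsMatch pattern image (pattern.length : Int)
        ((pattern.getD 0 []).length : Int) (a : Int) (a1 : Int) = true
    · rw [if_pos hm]
      unfold pvStepB
      rw [if_pos hm]
      rfl
    · rw [if_neg hm]
      unfold pvStepB
      rw [if_neg hm]
      rfl
  simp only [hbody]
  have hfl :
      (List.range (((image.length : Int) - (pattern.length : Int) + 1).toNat)).foldl (fun s r =>
        (List.range ((((image.getD 0 []).length : Int) - ((pattern.getD 0 []).length : Int) + 1).toNat)).foldl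
          (fun s' c => pvStepB pattern image s' (r, c)) s)
        PySem.Set.empty
      = (pvPos (((image.length : Int) - (pattern.length : Int) + 1).toNat)
          ((((image.getD 0 []).length : Int) - ((pattern.getD 0 []).length : Int) + 1).toNat)).foldl
          (pvStepB pattern image) PySem.Set.empty := by
    rw [pvPos_foldl]
  rw [hfl]
  have hcast : (PySem.Set.empty : PySem.Set (Int × Int)) = ([] : List (Nat × Nat)).map pvCast := rfl
  rw [hcast, pvBLoop pattern image
    (pvPos (((image.length : Int) - (pattern.length : Int) + 1).toNat)
      ((((image.getD 0 []).length : Int) - ((pattern.getD 0 []).length : Int) + 1).toNat)) []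
    (fun p hp => (pvPos_bounds pattern image p hp).1)]
  exact pvBOut _ image

-- ---- no-occurrence branch ----

theorem pvNoMatch_gcov (pattern image : List (List Int))
    (hp : pattern ≠ []) (hph : pattern.getD 0 [] ≠ [])
    (hnm : ¬ pvHasMatch pattern image) : pvGCov pattern image = [] := by
  have hpl : 0 < pattern.length := List.length_pos_iff.mpr hp
  have hprl : 0 < (pattern.getD 0 []).length := List.length_pos_iff.mpr hph
  unfold pvGCov
  have main : ∀ ps : List (Nat × Nat),
      (∀ p ∈ ps, p ∈ pvPos (pvNR pattern image) (pvNC pattern image)) →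
      ps.foldl (pvGStep pattern image) [] = [] := by
    intro ps
    induction ps with
    | nil => intro _; rfl
    | cons p t ih =>
      intro hmem
      rw [List.foldl_cons]
      have hb := pvPos_bounds pattern image p (hmem p List.mem_cons_self)
      have hstep : pvGStep pattern image [] p = [] := by
        unfold pvGStep
        rw [if_neg]
        rintro ⟨hst, -⟩
        exact hnm ⟨p.1, by omega, p.2, by omega, hst⟩
      rw [hstep]
      exact ih (fun q hq => hmem q (List.mem_cons_of_mem _ hq))
  exact main _ (fun p hp' => hp')

theorem pvNoMatch_A (pattern image : List (List Int))
    (hp : pattern ≠ []) (hph : pattern.getD 0 [] ≠ [])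
    (hnm : ¬ pvHasMatch pattern image) :
    (pvPos (pvNR pattern image) (pvNC pattern image)).foldl (pvStepA pattern) image = image := by
  have hpl : 0 < pattern.length := List.length_pos_iff.mpr hp
  have hprl : 0 < (pattern.getD 0 []).length := List.length_pos_iff.mpr hph
  have main : ∀ ps : List (Nat × Nat),
      (∀ p ∈ ps, p ∈ pvPos (pvNR pattern image) (pvNC pattern image)) →
      ps.foldl (pvStepA pattern) image = image := by
    intro ps
    induction ps with
    | nil => intro _; rfl
    | cons p t ih =>
      intro hmem
      rw [List.foldl_cons]
      have hb := pvPos_bounds pattern image p (hmem p List.mem_cons_self)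
      have hstep : pvStepA pattern image p = image := by
        unfold pvStepA
        rw [if_neg]
        intro hcond
        rw [Bool.and_eq_true] at hcond
        have h2 := hcond.2
        rw [pvSubset_natCast, beq_iff_eq] at h2
        exact hnm ⟨p.1, by omega, p.2, by omega, h2⟩
      rw [hstep]
      exact ih (fun q hq => hmem q (List.mem_cons_of_mem _ hq))
  exact main _ (fun p hp' => hp')

-- ===== VERDICT (by name: the statement is the Claim_ definition above) =====
theorem mark_patterns_spec : Claim_equal_mark_patterns := by
  intro pattern image _hdom hpre
  obtain ⟨hp, _hi, hph, _hsafe, hbranch⟩ := hpre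
  show mark_patterns pattern image = mark_patterns_alt pattern image
  rw [pvB_norm, pvA_norm]
  rcases hbranch with ⟨hrect, hvals⟩ | hnm
  · have h0 : pvPaint ([] : List (Nat × Nat)) image = image := pvPaint_empty image
    calc (pvPos (pvNR pattern image) (pvNC pattern image)).foldl (pvStepA pattern) image
        = (pvPos (pvNR pattern image) (pvNC pattern image)).foldl (pvStepA pattern) (pvPaint [] image) := by rw [h0]
      _ = pvPaint ((pvPos (pvNR pattern image) (pvNC pattern image)).foldl (pvGStep pattern image) []) image :=
          pvALoop pattern image _ [] hp hph hrect hvals (by intro q hq; simp at hq)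
      _ = pvPaint (pvGCov pattern image) image := rfl
  · rw [pvNoMatch_A pattern image hp hph hnm, pvNoMatch_gcov pattern image hp hph hnm,
        pvPaint_empty]
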